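-- pv_equiv track=rewrite | github.com/piotrwinkler/radioval-data-split | split_utils.py | select_all_rows_for_patient_ids
-- ===== SOURCE A (Python) =====
-- from collections import Counter, defaultdict
-- from copy import deepcopy
--
-- Row = dict[str, str]
--
-- def clean_value(value: str | None) -> str:
--     return (value or "").strip()
--
-- def select_all_rows_for_patient_ids(
--     rows: list[Row],
--     patient_ids: list[str],
--     patient_id_key: str = "patient_id",
-- ) -> list[Row]:
--     rows_by_patient_id: defaultdict[str, list[Row]] = defaultdict(list)
--     requested_patient_ids = set(patient_ids)
--
--     for row in rows:
--         patient_id = clean_value(row.get(patient_id_key))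
--         if patient_id in requested_patient_ids:
--             rows_by_patient_id[patient_id].append(deepcopy(row))
--
--     selected_rows: list[Row] = []
--     for patient_id in patient_ids:
--         selected_rows.extend(rows_by_patient_id.get(patient_id, []))
--
--     return selected_rows
-- ===== SOURCE B (Python) =====
-- from copy import deepcopy
--
-- Row = dict[str, str]
--
-- def clean_value(value: str | None) -> str:
--     return (value or "").strip()
--
-- def select_all_rows_for_patient_ids(
--     rows: list[Row],
--     patient_ids: list[str],
--     patient_id_key: str = "patient_id",
-- ) -> list[Row]:
--     selected_rows: list[Row] = []
--     for patient_id in patient_ids: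
--         for row in rows:
--             if clean_value(row.get(patient_id_key)) == patient_id:
--                 selected_rows.append(deepcopy(row))
--     return selected_rows
-- ===== Notes on version B (the rewrite author's own statement) =====
-- stated objective: simpler
-- what changed: Drops the grouping defaultdict and the requested-id set: B simply scans rows once per requested patient id, appending matching rows directly, which preserves A's per-id encounter order and duplicate-id re-emission.
import Mathlib
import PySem

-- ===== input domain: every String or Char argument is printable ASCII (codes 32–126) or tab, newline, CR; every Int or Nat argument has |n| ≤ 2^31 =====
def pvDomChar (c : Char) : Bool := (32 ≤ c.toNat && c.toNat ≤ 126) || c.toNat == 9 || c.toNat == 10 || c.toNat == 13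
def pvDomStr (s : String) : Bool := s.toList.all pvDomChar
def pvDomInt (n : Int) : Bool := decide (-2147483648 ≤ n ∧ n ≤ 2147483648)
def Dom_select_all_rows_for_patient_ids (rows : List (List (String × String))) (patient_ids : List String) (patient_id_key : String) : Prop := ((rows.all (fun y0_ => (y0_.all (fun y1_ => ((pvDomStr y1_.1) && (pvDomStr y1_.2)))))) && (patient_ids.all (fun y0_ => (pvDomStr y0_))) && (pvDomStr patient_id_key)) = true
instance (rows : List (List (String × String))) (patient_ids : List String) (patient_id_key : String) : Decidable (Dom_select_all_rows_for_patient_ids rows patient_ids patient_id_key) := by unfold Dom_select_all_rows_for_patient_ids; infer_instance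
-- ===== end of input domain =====

-- B drops A's grouping dict and requested-id set and instead scans rows once per requested id (simpler; not faster).
-- deepcopy is the identity on immutable string-to-string rows, so both ports just reuse the row value.

-- ===== PORT A =====
-- clean_value(row.get(key)): Python's `(value or "").strip()`; `or` picks "" both for None and for "" itself,
-- so it is exactly strip of the lookup's value-or-default.
def pvClean (o : Option String) : String := PySem.Str.strip (o.getD "")

def select_all_rows_for_patient_ids (rows : List (List (String × String))) (patient_ids : List String) (patient_id_key : String) : List (List (String × String)) :=
  let requested : PySem.Set String := PySem.Set.ofList patient_ids
  let grouped : PySem.Dict String (List (List (String × String))) :=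
    rows.foldl (fun d row =>
      let pid := pvClean ((PySem.Dict.mk row).get? patient_id_key)
      if PySem.Set.contains requested pid then d.modify pid [] (· ++ [row]) else d)
      PySem.Dict.empty
  patient_ids.foldl (fun acc pid => acc ++ grouped.getD pid []) []

-- ===== PORT B =====
def select_all_rows_for_patient_ids_alt (rows : List (List (String × String))) (patient_ids : List String) (patient_id_key : String) : List (List (String × String)) :=
  patient_ids.foldl (fun acc pid =>
    rows.foldl (fun a row =>
      if pvClean ((PySem.Dict.mk row).get? patient_id_key) == pid then a ++ [row] else a) acc) []

-- ===== PRECONDITION & SPEC =====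
def Spec_select_all_rows_for_patient_ids (rows : List (List (String × String))) (patient_ids : List String) (patient_id_key : String) (out : List (List (String × String))) : Prop := out = select_all_rows_for_patient_ids_alt rows patient_ids patient_id_key
instance (rows : List (List (String × String))) (patient_ids : List String) (patient_id_key : String) (out : List (List (String × String))) : Decidable (Spec_select_all_rows_for_patient_ids rows patient_ids patient_id_key out) := by unfold Spec_select_all_rows_for_patient_ids; infer_instance

-- ===== CLAIM (what is proved, stated in full; the proofs are below) =====
def Claim_equal_select_all_rows_for_patient_ids : Prop := ∀ (rows : List (List (String × String))) (patient_ids : List String) (patient_id_key : String), Dom_select_all_rows_for_patient_ids rows patient_ids patient_id_key → Spec_select_all_rows_for_patient_ids rows patient_ids patient_id_key (select_all_rows_for_patient_ids rows patient_ids patient_id_key)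

-- ===== LEMMAS AND PROOFS =====

-- The grouping dict's entry for a requested id is exactly the matching rows in encounter order.
theorem pv_groupGetD (patient_id_key : String) (patient_ids : List String) (rows : List (List (String × String)))
    (pid : String) (h : pid ∈ patient_ids) (d : PySem.Dict String (List (List (String × String)))) :
    (rows.foldl (fun d row =>
      let p := pvClean ((PySem.Dict.mk row).get? patient_id_key)
      if PySem.Set.contains (PySem.Set.ofList patient_ids) p then d.modify p [] (· ++ [row]) else d) d).getD pid []
    = d.getD pid [] ++ rows.filter (fun row => pvClean ((PySem.Dict.mk row).get? patient_id_key) == pid) := by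
  induction rows generalizing d with
  | nil => simp
  | cons r rs ih =>
    simp only [List.foldl_cons, List.filter_cons]
    by_cases hp : pvClean ((PySem.Dict.mk r).get? patient_id_key) = pid
    · have hc : (PySem.Set.ofList patient_ids).contains pid = true := by
        simpa [PySem.Set.contains] using (PySem.Set.mem_ofList patient_ids pid).mpr h
      simp only [hp]
      rw [if_pos hc, ih, PySem.Dict.getD_modify_self]
      simp
    · have hb : (pvClean ((PySem.Dict.mk r).get? patient_id_key) == pid) = false := by
        simpa using hp
      rw [hb]
      by_cases hc : (PySem.Set.ofList patient_ids).contains (pvClean ((PySem.Dict.mk r).get? patient_id_key)) = true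
      · simp only [hc, if_true, ih,
          PySem.Dict.getD_modify_of_ne _ _ _ (fun he => hp he.symm), if_false, Bool.false_eq_true]
      · simp only [Bool.not_eq_true] at hc
        simp only [hc, ih, if_false, Bool.false_eq_true]

-- ===== VERDICT (by name: the statement is the Claim_ definition above) =====
theorem select_all_rows_for_patient_ids_spec : Claim_equal_select_all_rows_for_patient_ids := by
  intro rows patient_ids patient_id_key _
  unfold Spec_select_all_rows_for_patient_ids select_all_rows_for_patient_ids select_all_rows_for_patient_ids_alt
  refine PySem.List.foldl_congr_mem patient_ids _ _ [] ?_
  intro acc pid hmem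
  rw [PySem.List.foldl_append_if_eq_filter,
     pv_groupGetD patient_id_key patient_ids rows pid hmem PySem.Dict.empty]
  simp
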